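-- pv_equiv track=rewrite | github.com/Yassine-SABIR/picoCTF | picoCTF VaultDoor8.py | descramble
-- ===== SOURCE A (Python) =====
-- def int2bin(integer):
--     if integer==0:
--         return "0"
--     else:
--         return int2bin(integer//2)+str(integer%2)
--
-- def bin2int(BIN):
--     if BIN=="":
--         return 0
--     else:
--         return 2*bin2int(BIN[:-1])+int(BIN[-1])
--
-- def char2bin(char):
--     BIN = int2bin(ord(char))
--     BIN = "00000000"+BIN
--     return BIN[-8:]
--
-- def switchBits(char, p1, p2):
--     BIN = char2bin(char)
--     BIN_switch = ""
--     for i in range(8):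
--         if i==p1:
--             BIN_switch += BIN[p2]
--         else:
--             if i==p2:
--                 BIN_switch += BIN[p1]
--             else:
--                 BIN_switch += BIN[i]
--     return chr(bin2int(BIN_switch))
--
-- def descramble(cipherPassword):
--     length = len(cipherPassword)
--     password = ""
--     for b in range(length):
--         c = cipherPassword[length-1-b]
--         c = switchBits(c,6,7)
--         c = switchBits(c,2,5)
--         c = switchBits(c,3,4)
--         c = switchBits(c,0,1)
--         c = switchBits(c,4,7)
--         c = switchBits(c,5,6)
--         c = switchBits(c,0,3)
--         c = switchBits(c,1,2)
--         password = c + password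
--     return password
-- ===== SOURCE B (Python) =====
-- def descramble(cipherPassword):
--     out = []
--     for c in cipherPassword:
--         n = ord(c) & 0xFF
--         m = ((n & 0x03) << 2) | ((n & 0x0C) << 4) | ((n & 0x30) >> 4) | ((n & 0xC0) >> 2)
--         out.append(chr(m))
--     return "".join(out)
-- ===== Notes on version B (the rewrite author's own statement) =====
-- stated objective: simpler
-- what changed: Replaces the reverse-iterate-and-prepend loop over eight recursive binary-string bit swaps per character by a single forward pass applying the precomputed net bit permutation with four mask-and-shift integer operations per character.
import Mathlib
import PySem

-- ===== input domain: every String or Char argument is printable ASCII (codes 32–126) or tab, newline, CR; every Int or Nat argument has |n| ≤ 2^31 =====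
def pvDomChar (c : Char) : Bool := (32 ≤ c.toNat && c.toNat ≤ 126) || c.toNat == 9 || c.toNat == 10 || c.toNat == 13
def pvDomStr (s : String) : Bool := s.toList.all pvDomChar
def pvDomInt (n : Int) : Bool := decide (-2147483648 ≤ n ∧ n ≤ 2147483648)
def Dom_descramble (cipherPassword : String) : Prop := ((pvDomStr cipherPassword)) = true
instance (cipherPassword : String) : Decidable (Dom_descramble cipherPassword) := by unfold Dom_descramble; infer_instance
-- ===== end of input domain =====

-- B replaces A's reversed loop of eight recursive binary-string bit swaps per character
-- by one forward pass applying the net bit permutation with four mask-and-shift operations (simpler).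

-- ===== PORT A =====
-- int2bin is only ever called on ord(char) ≥ 0, so the Python `integer // 2` is Nat division here
-- structural fuel (= the integer itself, enough since n/2 < n) keeps the recursion kernel-reducible
def int2binGo (fuel : Nat) (integer : Nat) : List Char :=
  match fuel with
  | 0 => ['0']
  | fuel + 1 =>
    if integer = 0 then ['0']
    else int2binGo fuel (integer / 2) ++ [if integer % 2 = 1 then '1' else '0']

def int2bin (integer : Nat) : List Char := int2binGo integer integer

-- result chars are only '0'/'1', so Python's int(BIN[-1]) is the digit value toNat - 48;
-- structural fuel (= the list length) keeps the recursion kernel-reducible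
def bin2intGo (fuel : Nat) (BIN : List Char) : Nat :=
  match fuel with
  | 0 => 0
  | fuel + 1 =>
    if BIN = [] then 0
    else 2 * bin2intGo fuel BIN.dropLast + ((BIN.getLastD '0').toNat - 48)

def bin2int (BIN : List Char) : Nat := bin2intGo BIN.length BIN

def char2bin (char : Char) : List Char :=
  let BIN := int2bin char.toNat
  let BIN2 := "00000000".toList ++ BIN
  BIN2.drop (BIN2.length - 8)  -- BIN[-8:]; length ≥ 8 after the zero-padding, so it is the last 8 chars

def switchBits (char : Char) (p1 p2 : Nat) : Char :=
  let BIN := char2bin char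
  let BIN_switch := (List.range 8).foldl (fun acc i =>
    if i = p1 then acc ++ [BIN.getD p2 '0']
    else if i = p2 then acc ++ [BIN.getD p1 '0']
    else acc ++ [BIN.getD i '0']) []
  Char.ofNat (bin2int BIN_switch)

def descramble (cipherPassword : String) : String :=
  let chars := cipherPassword.toList
  let length := chars.length
  let password := (List.range length).foldl (fun password b =>
    let c := chars.getD (length - 1 - b) ' '
    let c := switchBits c 6 7
    let c := switchBits c 2 5
    let c := switchBits c 3 4
    let c := switchBits c 0 1
    let c := switchBits c 4 7
    let c := switchBits c 5 6
    let c := switchBits c 0 3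
    let c := switchBits c 1 2
    [c] ++ password) []
  String.mk password

-- ===== PORT B =====
def permByte (n : Nat) : Nat :=
  ((n &&& 0x03) <<< 2) ||| ((n &&& 0x0C) <<< 4) ||| ((n &&& 0x30) >>> 4) ||| ((n &&& 0xC0) >>> 2)

def descramble_alt (cipherPassword : String) : String :=
  String.mk (cipherPassword.toList.map (fun c => Char.ofNat (permByte (c.toNat &&& 0xFF))))

-- ===== PRECONDITION & SPEC =====
def Spec_descramble (cipherPassword : String) (out : String) : Prop := out = descramble_alt cipherPassword
instance (cipherPassword : String) (out : String) : Decidable (Spec_descramble cipherPassword out) := by unfold Spec_descramble; infer_instance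

-- ===== CLAIM (what is proved, stated in full; the proofs are below) =====
def Claim_equal_descramble : Prop := ∀ (cipherPassword : String), Dom_descramble cipherPassword → Spec_descramble cipherPassword (descramble cipherPassword)

-- ===== LEMMAS AND PROOFS =====
-- A's per-character transformation: the chain of eight bit swaps
def stepA (c : Char) : Char :=
  switchBits (switchBits (switchBits (switchBits (switchBits (switchBits (switchBits (switchBits c 6 7) 2 5) 3 4) 0 1) 4 7) 5 6) 0 3) 1 2

def stepB (c : Char) : Char := Char.ofNat (permByte (c.toNat &&& 0xFF))

set_option maxRecDepth 100000 in
lemma step_eq_of_lt (n : Nat) (h : n < 127) : stepA (Char.ofNat n) = stepB (Char.ofNat n) := by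
  revert n h; decide

lemma getD_cons_shift (a : Char) (rest : List Char) (b : Nat) (hb : b < rest.length) :
    (a :: rest).getD (rest.length - b) ' ' = rest.getD (rest.length - 1 - b) ' ' := by
  have h1 : rest.length - b = (rest.length - 1 - b) + 1 := by omega
  rw [h1, List.getD_cons_succ]

lemma fold_shift (g : Char → Char) (a : Char) (rest : List Char) :
    ∀ (l : List Nat), (∀ b ∈ l, b < rest.length) → ∀ acc : List Char,
    l.foldl (fun pw b => g ((a :: rest).getD (rest.length - b) ' ') :: pw) acc
      = l.foldl (fun pw b => g (rest.getD (rest.length - 1 - b) ' ') :: pw) acc := by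
  intro l
  induction l with
  | nil => intro _ acc; rfl
  | cons x xs ih =>
    intro h acc
    simp only [List.foldl_cons]
    rw [getD_cons_shift a rest x (h x (by simp))]
    exact ih (fun b hb => h b (by simp [hb])) _

lemma loop_eq_map (g : Char → Char) :
    ∀ (chars : List Char) (acc : List Char),
    (List.range chars.length).foldl
      (fun pw b => g (chars.getD (chars.length - 1 - b) ' ') :: pw) acc
      = chars.map g ++ acc := by
  intro chars
  induction chars with
  | nil => intro acc; rfl
  | cons a rest ih =>
    intro acc
    simp only [List.length_cons, Nat.add_sub_cancel]
    rw [List.range_succ, List.foldl_append]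
    rw [fold_shift g a rest (List.range rest.length) (fun b hb => List.mem_range.mp hb) acc]
    rw [ih acc]
    simp only [List.foldl_cons, List.foldl_nil, Nat.sub_self, List.getD_cons_zero]
    simp

lemma dom_char_lt {s : String} (h : Dom_descramble s) :
    ∀ c ∈ s.toList, c.toNat < 127 := by
  intro c hc
  have := List.all_eq_true.mp h c hc
  simp only [pvDomChar, Bool.or_eq_true, Bool.and_eq_true, decide_eq_true_eq, beq_iff_eq] at this
  omega

-- ===== VERDICT (by name: the statement is the Claim_ definition above) =====
set_option maxRecDepth 100000 in
theorem descramble_spec : Claim_equal_descramble := by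
  intro s hdom
  unfold Spec_descramble
  have hA : descramble s = String.mk ((List.range s.toList.length).foldl
      (fun pw b => [stepA (s.toList.getD (s.toList.length - 1 - b) ' ')] ++ pw) []) := rfl
  rw [hA]
  simp only [List.singleton_append]
  rw [loop_eq_map stepA s.toList [], List.append_nil]
  unfold descramble_alt
  refine congrArg String.mk ?_
  apply List.map_congr_left
  intro c hc
  have h127 : c.toNat < 127 := dom_char_lt hdom c hc
  have h := step_eq_of_lt c.toNat h127
  unfold stepB at h
  rwa [Char.ofNat_toNat] at h
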